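-- pv_equiv track=rewrite | github.com/seatgeek/haldane | app/aws.py | sort_by_group
-- ===== SOURCE A (Python) =====
-- def sort_by_group(nodes, group=None):
--     groups = {
--         'None': []
--     }
--     for node in nodes:
--         if node.get('group') is None:
--             groups['None'].append(node)
--         else:
--             if node.get('group') not in groups:
--                 groups[node.get('group')] = []
--             groups[node.get('group')].append(node)
--
--     if group is not None:
--         if group in groups:
--             groups = {group: groups[group]}
--         else:
--             groups = {}
--
--     return groups
-- ===== SOURCE B (Python) =====
-- def sort_by_group(nodes, group=None):
--     def key(n):
--         g = n.get('group')
--         return 'None' if g is None else g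
--
--     keys = ['None']
--     for n in nodes:
--         k = key(n)
--         if k not in keys:
--             keys.append(k)
--
--     groups = {k: [n for n in nodes if key(n) == k] for k in keys}
--
--     if group is not None:
--         return {group: groups[group]} if group in groups else {}
--     return groups
-- ===== Notes on version B (the rewrite author's own statement) =====
-- stated objective: alternative
-- what changed: Instead of one accumulating pass that grows per-key lists inside a dict, B first collects the distinct normalized keys in first-appearance order (with 'None' seeded first) and then builds the result with a dict comprehension that re-scans the node list once per key; the optional group filter is a final conditional expression.
import Mathlib
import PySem

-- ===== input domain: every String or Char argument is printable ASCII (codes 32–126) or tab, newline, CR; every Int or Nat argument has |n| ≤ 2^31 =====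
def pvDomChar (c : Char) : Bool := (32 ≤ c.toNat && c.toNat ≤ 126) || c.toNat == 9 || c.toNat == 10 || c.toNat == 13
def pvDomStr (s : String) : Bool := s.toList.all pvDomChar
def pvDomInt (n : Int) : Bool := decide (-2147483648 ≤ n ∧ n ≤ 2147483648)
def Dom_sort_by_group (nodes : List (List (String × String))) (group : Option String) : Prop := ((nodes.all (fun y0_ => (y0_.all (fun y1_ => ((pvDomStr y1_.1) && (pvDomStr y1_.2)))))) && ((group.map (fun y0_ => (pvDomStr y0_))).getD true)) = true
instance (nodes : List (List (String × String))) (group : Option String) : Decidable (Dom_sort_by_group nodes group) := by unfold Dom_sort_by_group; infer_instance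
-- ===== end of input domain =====

-- B groups nodes by collecting distinct normalized keys first and re-scanning per key,
-- instead of A's single accumulating dict pass; same return value, similar cost ("alternative").

-- ===== PORT A =====
-- node.get('group'): first-match lookup on the association list (shared accessor)
def getGroup? (node : List (String × String)) : Option String :=
  (PySem.Dict.mk node).get? "group"

def sort_by_group (nodes : List (List (String × String))) (group : Option String) : List (String × List (List (String × String))) :=
  let groups : PySem.Dict String (List (List (String × String))) :=
    nodes.foldl (fun groups node =>
      match getGroup? node with
      | none => groups.modify "None" [] (· ++ [node])
      | some g =>
        let groups := if groups.contains g then groups else groups.insert g []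
        groups.modify g [] (· ++ [node]))
      (PySem.Dict.empty.insert "None" [])
  let groups :=
    match group with
    | none => groups
    | some g =>
      if groups.contains g then PySem.Dict.empty.insert g (groups.getD g []) else PySem.Dict.empty
  groups.items

-- ===== PORT B =====
def keyOf (node : List (String × String)) : String :=
  match getGroup? node with
  | none => "None"
  | some g => g

def sort_by_group_alt (nodes : List (List (String × String))) (group : Option String) : List (String × List (List (String × String))) :=
  let keys : List String :=
    nodes.foldl (fun ks n => if keyOf n ∈ ks then ks else ks ++ [keyOf n]) ["None"]
  let groups : List (String × List (List (String × String))) :=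
    keys.map (fun k => (k, nodes.filter (fun n => keyOf n == k)))
  match group with
  | none => groups
  | some g =>
    match groups.find? (fun p => p.1 == g) with
    | some p => [(g, p.2)]
    | none => []

-- ===== PRECONDITION & SPEC =====
def Spec_sort_by_group (nodes : List (List (String × String))) (group : Option String) (out : List (String × List (List (String × String)))) : Prop := out = sort_by_group_alt nodes group
instance (nodes : List (List (String × String))) (group : Option String) (out : List (String × List (List (String × String)))) : Decidable (Spec_sort_by_group nodes group out) := by unfold Spec_sort_by_group; infer_instance

-- ===== CLAIM (what is proved, stated in full; the proofs are below) =====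
def Claim_equal_sort_by_group : Prop := ∀ (nodes : List (List (String × String))) (group : Option String), Dom_sort_by_group nodes group → Spec_sort_by_group nodes group (sort_by_group nodes group)

-- ===== LEMMAS AND PROOFS =====

-- A's loop step (same lambda as in the port)
def aStep (groups : PySem.Dict String (List (List (String × String)))) (node : List (String × String)) : PySem.Dict String (List (List (String × String))) :=
  match getGroup? node with
  | none => groups.modify "None" [] (· ++ [node])
  | some g =>
    let groups := if groups.contains g then groups else groups.insert g []
    groups.modify g [] (· ++ [node])

-- B's key-collection step
def kStep (ks : List String) (n : List (String × String)) : List String :=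
  if keyOf n ∈ ks then ks else ks ++ [keyOf n]

def d0A : PySem.Dict String (List (List (String × String))) := PySem.Dict.empty.insert "None" []
def Kof (nodes : List (List (String × String))) : List String := nodes.foldl kStep ["None"]
def Gof (nodes : List (List (String × String))) : List (String × List (List (String × String))) :=
  (Kof nodes).map (fun k => (k, nodes.filter (fun n => keyOf n == k)))

theorem A_none (nodes : List (List (String × String))) :
    sort_by_group nodes none = (nodes.foldl aStep d0A).items := rfl
theorem A_some (nodes : List (List (String × String))) (g : String) :
    sort_by_group nodes (some g) =
      (if (nodes.foldl aStep d0A).contains g then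
        PySem.Dict.empty.insert g ((nodes.foldl aStep d0A).getD g [])
      else PySem.Dict.empty).items := rfl
theorem B_none (nodes : List (List (String × String))) :
    sort_by_group_alt nodes none = Gof nodes := rfl
theorem B_some (nodes : List (List (String × String))) (g : String) :
    sort_by_group_alt nodes (some g) =
      (match (Gof nodes).find? (fun p => p.1 == g) with
       | some p => [(g, p.2)]
       | none => []) := rfl

theorem aStep_keys (d : PySem.Dict String (List (List (String × String)))) (n : List (String × String))
    (hN : "None" ∈ d.keys) : (aStep d n).keys = kStep d.keys n := by
  cases hg : getGroup? n with
  | none =>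
    have hk : keyOf n = "None" := by simp [keyOf, hg]
    have hc : d.contains "None" = true := (PySem.Dict.contains_iff_mem_keys d _).mpr hN
    simp only [aStep, hg, kStep, hk, PySem.Dict.modify]
    rw [PySem.Dict.keys_insert_of_contains d _ hc, if_pos hN]
  | some g =>
    have hk : keyOf n = g := by simp [keyOf, hg]
    simp only [aStep, hg, kStep, hk, PySem.Dict.modify]
    by_cases hc : d.contains g = true
    · have hm : g ∈ d.keys := (PySem.Dict.contains_iff_mem_keys d g).mp hc
      rw [if_pos hc, PySem.Dict.keys_insert_of_contains d _ hc, if_pos hm]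
    · have hm : g ∉ d.keys := fun h => hc ((PySem.Dict.contains_iff_mem_keys d g).mpr h)
      have hc' : d.contains g = false := by
        cases h : d.contains g
        · rfl
        · exact absurd h hc
      rw [if_neg hc, if_neg hm]
      rw [PySem.Dict.keys_insert_of_contains _ _ (PySem.Dict.contains_insert_self d g [])]
      rw [PySem.Dict.keys_insert_of_not_contains d _ hc']

theorem aStep_getD (d : PySem.Dict String (List (List (String × String)))) (n : List (String × String)) (k : String) :
    (aStep d n).getD k [] = d.getD k [] ++ (if keyOf n == k then [n] else []) := by
  cases hg : getGroup? n with
  | none =>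
    have hk : keyOf n = "None" := by simp [keyOf, hg]
    simp only [aStep, hg, hk, PySem.Dict.modify]
    rw [PySem.Dict.getD_insert]
    by_cases h : k = "None"
    · simp [h]
    · simp [h, Ne.symm h]
  | some g =>
    have hk : keyOf n = g := by simp [keyOf, hg]
    simp only [aStep, hg, hk, PySem.Dict.modify]
    by_cases hc : d.contains g = true
    · rw [if_pos hc, PySem.Dict.getD_insert]
      by_cases h : k = g
      · simp [h]
      · simp [h, Ne.symm h]
    · have hc' : d.contains g = false := by
        cases h : d.contains g
        · rfl
        · exact absurd h hc
      rw [if_neg hc, PySem.Dict.getD_insert]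
      by_cases h : k = g
      · subst h
        rw [if_pos rfl, PySem.Dict.getD_insert_self]
        rw [PySem.Dict.getD_of_not_contains d _ hc']
        simp
      · rw [if_neg h, PySem.Dict.getD_insert_of_ne _ _ _ h]
        simp [Ne.symm h]

theorem foldA_keys (nodes : List (List (String × String))) (d : PySem.Dict String (List (List (String × String)))) (hN : "None" ∈ d.keys) :
    (nodes.foldl aStep d).keys = nodes.foldl kStep d.keys := by
  induction nodes generalizing d with
  | nil => rfl
  | cons n ns ih =>
    simp only [List.foldl_cons]
    have hN' : "None" ∈ (aStep d n).keys := by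
      rw [aStep_keys d n hN]
      unfold kStep
      split
      · exact hN
      · exact List.mem_append_left _ hN
    rw [ih _ hN', aStep_keys d n hN]

theorem foldA_getD (nodes : List (List (String × String))) (d : PySem.Dict String (List (List (String × String)))) (k : String) :
    (nodes.foldl aStep d).getD k [] = d.getD k [] ++ nodes.filter (fun n => keyOf n == k) := by
  induction nodes generalizing d with
  | nil => simp
  | cons n ns ih =>
    simp only [List.foldl_cons]
    rw [ih (aStep d n), aStep_getD, List.filter_cons]
    by_cases h : keyOf n = k
    · simp [h]
    · simp [h]

theorem foldK_nodup (nodes : List (List (String × String))) (ks : List String) (h : ks.Nodup) :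
    (nodes.foldl kStep ks).Nodup := by
  induction nodes generalizing ks with
  | nil => exact h
  | cons n ns ih =>
    simp only [List.foldl_cons]
    apply ih
    unfold kStep
    split
    · exact h
    · rename_i hnm
      refine List.nodup_append.mpr ⟨h, List.nodup_singleton _, ?_⟩
      intro a ha b hb
      simp only [List.mem_singleton] at hb
      subst hb
      exact fun heq => hnm (heq ▸ ha)

theorem find?_map_key {β : Type} (K : List String) (F : String → β) (g : String) :
    (K.map (fun k => (k, F k))).find? (fun p => p.1 == g) =
      if g ∈ K then some (g, F g) else none := by
  induction K with
  | nil => simp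
  | cons k ks ih =>
    simp only [List.map_cons]
    by_cases h : k = g
    · subst h
      rw [List.find?_cons_of_pos (by simp)]
      simp
    · rw [List.find?_cons_of_neg (by simp [h]), ih]
      by_cases hm : g ∈ ks
      · simp [hm, Ne.symm h]
      · simp [hm, Ne.symm h]

-- A's dict after the loop has exactly B's items
theorem foldA_items (nodes : List (List (String × String))) :
    (nodes.foldl aStep d0A).items = Gof nodes := by
  have hkeys0 : d0A.keys = ["None"] := by
    unfold d0A
    rw [PySem.Dict.keys_insert_of_not_contains _ _ (PySem.Dict.contains_empty _)]
    rw [PySem.Dict.keys_empty]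
    rfl
  have hN : "None" ∈ d0A.keys := by rw [hkeys0]; simp
  have hkeys : (nodes.foldl aStep d0A).keys = Kof nodes := by
    rw [foldA_keys nodes d0A hN, hkeys0]; rfl
  have hnd : (nodes.foldl aStep d0A).keys.Nodup := by
    rw [hkeys]; exact foldK_nodup nodes ["None"] (by simp)
  rw [PySem.Dict.items_eq_map_keys _ hnd [], hkeys]
  unfold Gof
  apply List.map_congr_left
  intro k _
  rw [foldA_getD]
  have hd0 : d0A.getD k [] = [] := by
    unfold d0A
    by_cases h : k = "None"
    · subst h; rw [PySem.Dict.getD_insert_self]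
    · rw [PySem.Dict.getD_insert_of_ne _ _ _ h, PySem.Dict.getD_empty]
  rw [hd0]; rfl

theorem keys_foldA (nodes : List (List (String × String))) :
    (nodes.foldl aStep d0A).keys = Kof nodes := by
  have h := congrArg (List.map Prod.fst) (foldA_items nodes)
  have hk : (nodes.foldl aStep d0A).keys = (nodes.foldl aStep d0A).items.map Prod.fst := by
    simp only [PySem.Dict.keys]
  rw [hk, h]
  simp only [Gof, List.map_map]
  have hid : (Prod.fst ∘ fun k => (k, List.filter (fun n => keyOf n == k) nodes)) = id := rfl
  rw [hid, List.map_id]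

theorem sort_by_group_eq (nodes : List (List (String × String))) (group : Option String) :
    sort_by_group nodes group = sort_by_group_alt nodes group := by
  cases group with
  | none => rw [A_none, B_none, foldA_items]
  | some g =>
    rw [A_some, B_some]
    unfold Gof
    rw [find?_map_key]
    set d := nodes.foldl aStep d0A with hd
    have hitems := foldA_items nodes
    unfold Gof at hitems
    have hkeys := keys_foldA nodes
    have hnd : d.keys.Nodup := by
      rw [hkeys]; exact foldK_nodup nodes ["None"] (by simp)
    by_cases hm : g ∈ Kof nodes
    · have hc : d.contains g = true := by
        rw [PySem.Dict.contains_iff_mem_keys, hkeys]; exact hm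
      rw [if_pos hc, if_pos hm]
      have hgd : d.getD g [] = nodes.filter (fun n => keyOf n == g) := by
        apply PySem.Dict.getD_of_mem_items d _ hnd
        rw [hitems]
        exact List.mem_map_of_mem hm
      rw [hgd]
      rw [PySem.Dict.items_insert_of_not_contains _ _ (PySem.Dict.contains_empty _)]
      rfl
    · have hc : d.contains g = false := by
        cases h : d.contains g
        · rfl
        · exact absurd ((PySem.Dict.contains_iff_mem_keys d g).mp h) (hkeys ▸ hm)
      rw [hc, if_neg hm]
      rfl

-- ===== VERDICT (by name: the statement is the Claim_ definition above) =====
theorem sort_by_group_spec : Claim_equal_sort_by_group := by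
  intro nodes group _
  unfold Spec_sort_by_group
  exact sort_by_group_eq nodes group
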